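-- pv_equiv track=rewrite | github.com/ijunxyz123/igtdetect-djones | igtdetect.py | partial_matches
-- ===== SOURCE A (Python) =====
-- def partial_matches(eval_spans, gold_spans, mode):
--     """
--     The partial span precision is calculated by the number of system spans which overlap
--     in some way with a system span.
--
--     :type eval_spans: OrderedDict
--     :type gold_spans: OrderedDict
--     """
--     matches = 0
--
--     if mode == 'precision':
--         for sys_start, sys_stop in [(s[0], s[-1]) for s in eval_spans.values()]:
--             for gold_start, gold_stop in [(s[0], s[-1]) for s in gold_spans.values()]:
--
--                 # We define a partial match by whether either the start or stop index of
--                 # the system span occurs within the [start,stop] range of at least one gold span.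
--                 if (gold_stop >= sys_start >= gold_start) or (gold_stop >= sys_stop >= gold_start):
--                     matches += 1
--                     break
--     elif mode == 'recall':
--         for gold_start, gold_stop in [(s[0], s[-1]) for s in gold_spans.values()]:
--             for sys_start, sys_stop in [(s[0], s[-1]) for s in eval_spans.values()]:
--                 if (sys_stop >= gold_start >= sys_start) or (sys_stop >= gold_stop >= sys_start):
--                     matches += 1
--                     break
--
--     return matches
-- ===== SOURCE B (Python) =====
-- def _merge(ivs):
--     # ivs sorted by start: fold into disjoint intervals, widening the last one
--     merged = []
--     for iv in ivs:
--         if merged and iv[0] <= merged[-1][1]: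
--             if iv[1] > merged[-1][1]:
--                 merged[-1] = (merged[-1][0], iv[1])
--         else:
--             merged.append(iv)
--     return merged
--
--
-- def _covered(merged, x):
--     return any(a <= x <= b for a, b in merged)
--
--
-- def _count(outer, inner):
--     pairs = [(s[0], s[-1]) for s in inner.values()]
--     ivs = sorted((p for p in pairs if p[0] <= p[1]), key=lambda p: p[0])
--     merged = _merge(ivs)
--     matches = 0
--     for s in outer.values():
--         if _covered(merged, s[0]) or _covered(merged, s[-1]):
--             matches += 1
--     return matches
--
--
-- def partial_matches(eval_spans, gold_spans, mode):
--     if mode == 'precision':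
--         return _count(eval_spans, gold_spans)
--     elif mode == 'recall':
--         return _count(gold_spans, eval_spans)
--     return 0
-- ===== Notes on version B (the rewrite author's own statement) =====
-- stated objective: alternative
-- what changed: Instead of A's nested scan (every outer span checked against every inner span), B sorts the inner (start,stop) pairs once, merges them into disjoint intervals, and tests each outer span's two endpoints against that merged list.
-- outside the precondition, e.g. on partial_matches({}, {'g': []}, 'precision'): A returns 0, B raises IndexError
import Mathlib
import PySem

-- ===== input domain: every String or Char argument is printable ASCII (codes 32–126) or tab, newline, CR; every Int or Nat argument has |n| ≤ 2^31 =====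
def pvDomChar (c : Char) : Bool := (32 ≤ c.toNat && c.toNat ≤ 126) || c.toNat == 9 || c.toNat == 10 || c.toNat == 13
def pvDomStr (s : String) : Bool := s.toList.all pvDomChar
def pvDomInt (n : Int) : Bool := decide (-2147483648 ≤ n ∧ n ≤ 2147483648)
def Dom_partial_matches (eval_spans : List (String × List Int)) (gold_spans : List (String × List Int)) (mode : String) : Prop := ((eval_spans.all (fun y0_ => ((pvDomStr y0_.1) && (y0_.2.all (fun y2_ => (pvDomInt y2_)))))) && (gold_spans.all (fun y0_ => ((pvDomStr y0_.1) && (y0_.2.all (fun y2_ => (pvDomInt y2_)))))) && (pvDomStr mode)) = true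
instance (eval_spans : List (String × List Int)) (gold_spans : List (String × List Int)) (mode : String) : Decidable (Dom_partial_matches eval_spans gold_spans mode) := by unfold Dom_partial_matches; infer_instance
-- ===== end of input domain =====

-- B merges the inner spans into sorted disjoint intervals once and tests each outer endpoint
-- against that merged list, instead of A's nested scan of all inner spans per outer span.

-- ===== PORT A =====
-- [(s[0], s[-1]) for s in d.values()]  (shared by both ports: both Pythons build these pairs)
def pmPairs (d : List (String × List Int)) : List (Int × Int) :=
  (d.map (fun kv => kv.2)).map (fun s => (PySem.List.pyGetD s 0 0, PySem.List.pyGetD s (-1) 0))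

-- A's inner `for … if cond: cnt += 1; break` loop
def pmA_break (x1 x2 m : Int) : List (Int × Int) → Int
  | [] => m
  | (g1, g2) :: t => if (g2 ≥ x1 ∧ x1 ≥ g1) ∨ (g2 ≥ x2 ∧ x2 ≥ g1) then m + 1 else pmA_break x1 x2 m t

def partial_matches (eval_spans : List (String × List Int)) (gold_spans : List (String × List Int)) (mode : String) : Int :=
  if mode = "precision" then
    (pmPairs eval_spans).foldl (fun cnt p => pmA_break p.1 p.2 cnt (pmPairs gold_spans)) 0
  else if mode = "recall" then
    (pmPairs gold_spans).foldl (fun cnt p => pmA_break p.1 p.2 cnt (pmPairs eval_spans)) 0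
  else 0

-- ===== PORT B =====
-- one step of B's `_merge` loop (append, or widen merged[-1])
def pmB_step (acc : List (Int × Int)) (iv : Int × Int) : List (Int × Int) :=
  match acc.getLast? with
  | some last =>
      if iv.1 ≤ last.2 then (if iv.2 > last.2 then acc.dropLast ++ [(last.1, iv.2)] else acc)
      else acc ++ [iv]
  | none => acc ++ [iv]

def pmB_merge (ivs : List (Int × Int)) : List (Int × Int) := ivs.foldl pmB_step []

-- B's `_covered(merged, x)`
def pmB_covered (merged : List (Int × Int)) (x : Int) : Bool :=
  merged.any (fun p => decide (p.1 ≤ x) && decide (x ≤ p.2))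

-- B's `_count(outer, inner)`
def pmB_count (outer inner : List (String × List Int)) : Int :=
  let ivs := PySem.List.sorted ((pmPairs inner).filter (fun p => decide (p.1 ≤ p.2))) (fun p => p.1) false
  let merged := pmB_merge ivs
  (outer.map (fun kv => kv.2)).foldl
    (fun cnt s =>
      if pmB_covered merged (PySem.List.pyGetD s 0 0) || pmB_covered merged (PySem.List.pyGetD s (-1) 0)
      then cnt + 1 else cnt) 0

def partial_matches_alt (eval_spans : List (String × List Int)) (gold_spans : List (String × List Int)) (mode : String) : Int :=
  if mode = "precision" then pmB_count eval_spans gold_spans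
  else if mode = "recall" then pmB_count gold_spans eval_spans
  else 0

-- ===== PRECONDITION & SPEC =====
-- Pre_ excludes inputs where some span list is empty under mode 'precision'/'recall': A raises
-- IndexError on s[0] there, except in the corner where the other side's span dict is empty so A
-- never reads the empty span and returns 0 while B (which always reads the inner spans) raises.
def Pre_partial_matches (eval_spans : List (String × List Int)) (gold_spans : List (String × List Int)) (mode : String) : Prop :=
  (mode = "precision" ∨ mode = "recall") →
    ((∀ kv ∈ eval_spans, kv.2 ≠ []) ∧ (∀ kv ∈ gold_spans, kv.2 ≠ []))
instance (eval_spans : List (String × List Int)) (gold_spans : List (String × List Int)) (mode : String) : Decidable (Pre_partial_matches eval_spans gold_spans mode) := by unfold Pre_partial_matches; infer_instance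

def pvWitness_partial_matches : (List (String × List Int)) × (List (String × List Int)) × String :=
  ([("a", [1, 2])], [("b", [2, 3])], "precision")

def Spec_partial_matches (eval_spans : List (String × List Int)) (gold_spans : List (String × List Int)) (mode : String) (out : Int) : Prop := out = partial_matches_alt eval_spans gold_spans mode
instance (eval_spans : List (String × List Int)) (gold_spans : List (String × List Int)) (mode : String) (out : Int) : Decidable (Spec_partial_matches eval_spans gold_spans mode out) := by unfold Spec_partial_matches; infer_instance

-- ===== CLAIM (what is proved, stated in full; the proofs are below) =====
def Claim_equal_partial_matches : Prop := ∀ (eval_spans : List (String × List Int)) (gold_spans : List (String × List Int)) (mode : String), Dom_partial_matches eval_spans gold_spans mode → Pre_partial_matches eval_spans gold_spans mode → Spec_partial_matches eval_spans gold_spans mode (partial_matches eval_spans gold_spans mode)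

-- ===== LEMMAS AND PROOFS =====

-- A's break loop counts 1 exactly when some inner pair covers x1 or x2
lemma pmA_break_eq (l : List (Int × Int)) (x1 x2 m : Int) :
    pmA_break x1 x2 m l = if pmB_covered l x1 || pmB_covered l x2 then m + 1 else m := by
  induction l with
  | nil => simp [pmA_break, pmB_covered]
  | cons p t ih =>
    obtain ⟨g1, g2⟩ := p
    rw [pmA_break, ih]
    by_cases h : (g2 ≥ x1 ∧ x1 ≥ g1) ∨ (g2 ≥ x2 ∧ x2 ≥ g1)
    · have h1 : (pmB_covered ((g1, g2) :: t) x1 || pmB_covered ((g1, g2) :: t) x2) = true := by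
        simp only [pmB_covered, List.any_cons, Bool.or_eq_true, Bool.and_eq_true, decide_eq_true_eq]
        omega
      simp [h, h1]
    · have h1 : (pmB_covered ((g1, g2) :: t) x1 || pmB_covered ((g1, g2) :: t) x2)
          = (pmB_covered t x1 || pmB_covered t x2) := by
        simp only [pmB_covered, List.any_cons]
        have e1 : (decide (g1 ≤ x1) && decide (x1 ≤ g2)) = false := by
          simp only [Bool.and_eq_false_iff, decide_eq_false_iff_not]; omega
        have e2 : (decide (g1 ≤ x2) && decide (x2 ≤ g2)) = false := by
          simp only [Bool.and_eq_false_iff, decide_eq_false_iff_not]; omega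
        rw [e1, e2]
        simp
      simp [h, h1]

-- covered is invariant under permutation
lemma pmB_covered_perm {l1 l2 : List (Int × Int)} (h : l1.Perm l2) (x : Int) :
    pmB_covered l1 x = pmB_covered l2 x :=
  h.any_eq

-- dropping empty intervals does not change coverage
lemma pmB_covered_filter (l : List (Int × Int)) (x : Int) :
    pmB_covered (l.filter (fun p => decide (p.1 ≤ p.2))) x = pmB_covered l x := by
  unfold pmB_covered
  rw [List.any_filter]
  congr 1
  funext p
  apply Bool.eq_iff_iff.mpr
  simp only [Bool.and_eq_true, decide_eq_true_eq]
  omega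

-- widening [c,d] to [c,b] absorbs an overlapping [a,b] exactly
lemma pm_cover_split (c d a b x : Int) (hca : c ≤ a) (had : a ≤ d) (hdb : d < b) :
    (decide (c ≤ x) && decide (x ≤ b)) =
      ((decide (c ≤ x) && decide (x ≤ d)) || (decide (a ≤ x) && decide (x ≤ b))) := by
  apply Bool.eq_iff_iff.mpr
  simp only [Bool.or_eq_true, Bool.and_eq_true, decide_eq_true_eq]
  omega

-- the merge fold preserves coverage
lemma pmB_covered_foldl (ivs : List (Int × Int)) (acc : List (Int × Int)) (x : Int)
    (hs : ivs.Pairwise (fun p q => p.1 ≤ q.1))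
    (hl : ∀ c d, acc.getLast? = some (c, d) → ∀ p ∈ ivs, c ≤ p.1) :
    pmB_covered (ivs.foldl pmB_step acc) x = (pmB_covered acc x || pmB_covered ivs x) := by
  induction ivs generalizing acc with
  | nil => simp [pmB_covered]
  | cons iv t ih =>
    obtain ⟨a, b⟩ := iv
    have hst : t.Pairwise (fun p q => p.1 ≤ q.1) := (List.pairwise_cons.mp hs).2
    have hhead : ∀ p ∈ t, a ≤ p.1 := (List.pairwise_cons.mp hs).1
    simp only [List.foldl_cons]
    rcases hacc : acc.getLast? with _ | ⟨c, d⟩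
    · have hnil : acc = [] := List.getLast?_eq_none_iff.mp hacc
      subst hnil
      have hstep : pmB_step [] (a, b) = [(a, b)] := by simp [pmB_step]
      rw [hstep, ih [(a, b)] hst ?_]
      · simp [pmB_covered]
      · intro c d h p hp
        simp only [List.getLast?_singleton, Option.some.injEq, Prod.mk.injEq] at h
        exact h.1 ▸ hhead p hp
    · obtain ⟨ys, hys⟩ := List.getLast?_eq_some_iff.mp hacc
      subst hys
      have hca : c ≤ a := hl c d hacc (a, b) (by simp)
      by_cases h1 : a ≤ d
      · by_cases h2 : b > d
        · have hstep : pmB_step (ys ++ [(c, d)]) (a, b) = ys ++ [(c, b)] := by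
            simp [pmB_step, h1, h2]
          rw [hstep, ih (ys ++ [(c, b)]) hst ?_]
          · simp only [pmB_covered, List.any_append, List.any_cons, List.any_nil]
            rw [pm_cover_split c d a b x hca h1 h2]
            apply Bool.eq_iff_iff.mpr
            simp only [Bool.or_eq_true]
            tauto
          · intro c' d' h' p hp
            rw [List.getLast?_concat] at h'
            simp only [Option.some.injEq, Prod.mk.injEq] at h'
            exact h'.1 ▸ le_trans hca (hhead p hp)
        · have hstep : pmB_step (ys ++ [(c, d)]) (a, b) = ys ++ [(c, d)] := by
            simp [pmB_step, h1, h2]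
          rw [hstep, ih (ys ++ [(c, d)]) hst ?_]
          · have habs : (decide (a ≤ x) && decide (x ≤ b)) = true →
                (decide (c ≤ x) && decide (x ≤ d)) = true := by
              simp only [Bool.and_eq_true, decide_eq_true_eq]
              omega
            cases hab : (decide (a ≤ x) && decide (x ≤ b)) with
            | false => simp [pmB_covered, hab]
            | true =>
              have hcd := habs hab
              simp [pmB_covered, List.any_append, hab, hcd]
          · intro c' d' h' p hp
            rw [List.getLast?_concat] at h'
            simp only [Option.some.injEq, Prod.mk.injEq] at h'
            exact h'.1 ▸ hl c d hacc p (List.mem_cons_of_mem _ hp)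
      · have hstep : pmB_step (ys ++ [(c, d)]) (a, b) = (ys ++ [(c, d)]) ++ [(a, b)] := by
          simp [pmB_step, h1]
        rw [hstep, ih ((ys ++ [(c, d)]) ++ [(a, b)]) hst ?_]
        · simp [pmB_covered, List.any_append, Bool.or_assoc]
        · intro c' d' h' p hp
          rw [List.getLast?_concat] at h'
          simp only [Option.some.injEq, Prod.mk.injEq] at h'
          exact h'.1 ▸ hhead p hp

lemma pmB_covered_merge (ivs : List (Int × Int)) (x : Int)
    (hs : ivs.Pairwise (fun p q => p.1 ≤ q.1)) :
    pmB_covered (pmB_merge ivs) x = pmB_covered ivs x := by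
  unfold pmB_merge
  rw [pmB_covered_foldl ivs [] x hs (by intro c d h; simp at h)]
  simp [pmB_covered]

-- B's merged list covers a point exactly when some raw inner pair does
lemma pmB_covered_chain (inner : List (String × List Int)) (y : Int) :
    pmB_covered (pmB_merge (PySem.List.sorted ((pmPairs inner).filter (fun p => decide (p.1 ≤ p.2))) (fun p => p.1) false)) y
      = pmB_covered (pmPairs inner) y := by
  rw [pmB_covered_merge _ _ (PySem.List.sorted_pairwise _ _)]
  rw [pmB_covered_perm (PySem.List.sorted_perm _ _ _) y]
  exact pmB_covered_filter _ y

-- the whole count agrees per mode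
lemma pm_count_eq (outer inner : List (String × List Int)) :
    (pmPairs outer).foldl (fun cnt p => pmA_break p.1 p.2 cnt (pmPairs inner)) 0 =
      pmB_count outer inner := by
  unfold pmB_count
  rw [show pmPairs outer = (outer.map (fun kv => kv.2)).map
      (fun s => (PySem.List.pyGetD s 0 0, PySem.List.pyGetD s (-1) 0)) from rfl]
  rw [List.foldl_map]
  congr 1
  funext cnt s
  rw [pmA_break_eq, pmB_covered_chain, pmB_covered_chain]

-- ===== VERDICT (by name: the statement is the Claim_ definition above) =====
theorem partial_matches_spec : Claim_equal_partial_matches := by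
  intro e g mode _ _
  unfold Spec_partial_matches partial_matches partial_matches_alt
  split_ifs <;> first | rfl | exact pm_count_eq _ _
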